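-- pv_equiv track=rewrite | github.com/pypi-data/pypi-mirror-132 | packages/slip39/slip39-2.0.0.tar.gz/slip39-2.0.0/slip39/main.py | organize_mnemonic
-- ===== SOURCE A (Python) =====
-- def enumerate_mnemonic( mnemonic ):
--     if isinstance( mnemonic, str ):
--         mnemonic		= mnemonic.split( ' ' )
--     return dict(
--         (i, f"{i+1:>2d} {w}")
--         for i,w in enumerate( mnemonic )
--     )
--
-- def organize_mnemonic( mnemonic, rows = 7, cols = 3, label="" ):
--     """Given a "word word ... word" or ["word", "word", ..., "word"] mnemonic, emit rows organized in
--     the desired rows and cols.  We return the fully formatted line, plus the list of individual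
--     words in that line."""
--     num_words			= enumerate_mnemonic( mnemonic )
--     for r in range( rows ):
--         line			= label if r == 0 else ' ' * len( label )
--         words			= []
--         for c in range( cols ):
--             word		= num_words.get( c * rows + r )
--             if word:
--                 words.append( word )
--                 line	       += f"{word:<13}"
--         yield line,words
-- ===== SOURCE B (Python) =====
-- def organize_mnemonic(mnemonic, rows=7, cols=3, label=""):
--     """Single distribution pass: each word i lands in row bucket i % rows
--     (column-major layout means index i = c*rows + r), then the rows are emitted."""
--     words = mnemonic.split(' ') if isinstance(mnemonic, str) else list(mnemonic)
--     limit = rows * cols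
--     buckets = {}
--     for i, w in enumerate(words):
--         if i < limit:
--             buckets.setdefault(i % rows, []).append(f"{i+1:>2d} {w}")
--     for r in range(rows):
--         cells = buckets.get(r, [])
--         pad = label if r == 0 else ' ' * len(label)
--         yield pad + ''.join(f"{c:<13}" for c in cells), cells
-- ===== Notes on version B (the rewrite author's own statement) =====
-- stated objective: alternative
-- what changed: B replaces A's rows*cols grid of dict lookups (row loop with an inner column loop doing num_words.get(c*rows+r)) by a single distribution pass over the words: word i is appended to bucket i % rows (since grid index i = c*rows + r), and each row is then emitted from its ready bucket.
import Mathlib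
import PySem

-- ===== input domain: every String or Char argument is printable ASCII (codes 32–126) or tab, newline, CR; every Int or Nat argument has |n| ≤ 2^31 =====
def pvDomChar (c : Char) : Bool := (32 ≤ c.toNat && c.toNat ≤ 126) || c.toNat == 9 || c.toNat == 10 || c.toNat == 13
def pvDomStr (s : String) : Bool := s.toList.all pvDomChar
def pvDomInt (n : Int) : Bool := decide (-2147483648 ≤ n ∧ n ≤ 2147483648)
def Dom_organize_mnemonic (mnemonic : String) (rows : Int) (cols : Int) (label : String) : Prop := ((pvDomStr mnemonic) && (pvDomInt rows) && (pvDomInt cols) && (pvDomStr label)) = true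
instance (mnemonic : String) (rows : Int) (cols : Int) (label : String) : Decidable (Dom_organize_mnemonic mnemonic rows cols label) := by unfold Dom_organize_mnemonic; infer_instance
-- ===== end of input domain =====

-- B replaces A's rows×cols grid of dict lookups by ONE distribution pass over the words:
-- word i goes to row bucket i % rows (grid index i = c*rows + r), then each row is emitted
-- from its bucket (objective: alternative decomposition; same asymptotic cost).
-- Equivalence of RETURN values (the Python generators, consumed as lists).

-- shared rendering of the two f-strings (strings handled as List Char, wrapped into String at the end)
-- f"{i+1:>2d} {w}"  (right-justify str(i+1) to width 2 with spaces)
def pvFmt (i : Int) (w : List Char) : List Char :=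
  List.replicate (2 - (PySem.Int.toChars (i + 1)).length) ' ' ++ PySem.Int.toChars (i + 1) ++ ' ' :: w

-- f"{word:<13}"  (left-justify to width 13 with spaces)
def pvLjust13 (w : List Char) : List Char := w ++ List.replicate (13 - w.length) ' '

-- ===== PORT A =====
-- dict( (i, f"{i+1:>2d} {w}") for i,w in enumerate(mnemonic.split(' ')) )
def enumerate_mnemonic (mnemonic : String) : PySem.Dict Int (List Char) :=
  PySem.Dict.ofList
    ((PySem.List.enumerate (PySem.Chars.splitOn mnemonic.toList [' ']) 0).map
      (fun p => (p.1, pvFmt p.1 p.2)))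

def organize_mnemonic (mnemonic : String) (rows : Int) (cols : Int) (label : String) : List (String × List String) :=
  let num_words := enumerate_mnemonic mnemonic
  (PySem.List.pyRange 0 rows 1).map (fun r =>
    -- line starts as label on the first row, else its blank padding; the inner loop over the
    -- columns threads (line, words) and appends each present word
    (fun res => (String.ofList res.1, res.2.map String.ofList))
      ((PySem.List.pyRange 0 cols 1).foldl
        (fun (acc : List Char × List (List Char)) c =>
          match num_words.get? (c * rows + r) with
          | some word => if word.isEmpty then acc else (acc.1 ++ pvLjust13 word, acc.2 ++ [word])
          | none => acc)
        ((if r = 0 then label.toList else List.replicate label.toList.length ' '), [])))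

-- ===== PORT B =====
-- one pass: buckets.setdefault(i % rows, []).append(f"{i+1:>2d} {w}") for i < rows*cols,
-- then each row r yields buckets.get(r, []) rendered into a line
def organize_mnemonic_alt (mnemonic : String) (rows : Int) (cols : Int) (label : String) : List (String × List String) :=
  let words := PySem.Chars.splitOn mnemonic.toList [' ']
  let limit := rows * cols
  let buckets : PySem.Dict Int (List (List Char)) :=
    (PySem.List.enumerate words 0).foldl
      (fun d p =>
        if p.1 < limit then d.modify (PySem.Int.mod p.1 rows) [] (fun x => x ++ [pvFmt p.1 p.2])
        else d)
      PySem.Dict.empty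
  (PySem.List.pyRange 0 rows 1).map (fun r =>
    (fun cells =>
        (String.ofList ((if r = 0 then label.toList else List.replicate label.toList.length ' ') ++
            PySem.Chars.join [] (cells.map pvLjust13)),
         cells.map String.ofList))
      (buckets.getD r []))

-- ===== PRECONDITION & SPEC =====
def Spec_organize_mnemonic (mnemonic : String) (rows : Int) (cols : Int) (label : String) (out : List (String × List String)) : Prop := out = organize_mnemonic_alt mnemonic rows cols label
instance (mnemonic : String) (rows : Int) (cols : Int) (label : String) (out : List (String × List String)) : Decidable (Spec_organize_mnemonic mnemonic rows cols label out) := by unfold Spec_organize_mnemonic; infer_instance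

-- ===== CLAIM (what is proved, stated in full; the proofs are below) =====
def Claim_equal_organize_mnemonic : Prop := ∀ (mnemonic : String) (rows : Int) (cols : Int) (label : String), Dom_organize_mnemonic mnemonic rows cols label → Spec_organize_mnemonic mnemonic rows cols label (organize_mnemonic mnemonic rows cols label)

-- ===== LEMMAS AND PROOFS =====

lemma pvJoinNilCons (x : List Char) (xs : List (List Char)) :
    PySem.Chars.join [] (x :: xs) = x ++ PySem.Chars.join [] xs := by
  cases xs with
  | nil => simp [PySem.Chars.join_singleton, PySem.Chars.join_nil]
  | cons y t => rw [PySem.Chars.join_cons_cons]; simp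

lemma pvFmt_ne_nil (i : Int) (w : List Char) : pvFmt i w ≠ [] := by
  simp [pvFmt]

-- A's inner loop, closed: it appends exactly the present, non-empty cells.
lemma pvFoldA (d : PySem.Dict Int (List Char)) (rows r : Int) (l : List Int)
    (a : List Char) (b : List (List Char)) :
    l.foldl
      (fun (acc : List Char × List (List Char)) c =>
        match d.get? (c * rows + r) with
        | some word => if word.isEmpty then acc else (acc.1 ++ pvLjust13 word, acc.2 ++ [word])
        | none => acc)
      (a, b)
    = (a ++ PySem.Chars.join []
          ((l.filterMap (fun c => (d.get? (c * rows + r)).bind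
              (fun w => if w.isEmpty then none else some w))).map pvLjust13),
       b ++ l.filterMap (fun c => (d.get? (c * rows + r)).bind
              (fun w => if w.isEmpty then none else some w))) := by
  induction l generalizing a b with
  | nil => simp [PySem.Chars.join_nil]
  | cons c t ih =>
    rw [List.foldl_cons, List.filterMap_cons]
    cases h : d.get? (c * rows + r) with
    | none =>
      simp only [Option.bind]
      exact ih a b
    | some w =>
      by_cases hw : w.isEmpty
      · simp only [Option.bind, if_pos hw]
        exact ih a b
      · simp only [Option.bind, if_neg hw]
        rw [ih, List.map_cons, pvJoinNilCons]
        simp [List.append_assoc, Option.bind]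

-- lookup in the enumerate-built dict is indexing into the formatted list
lemma pvDictGet (ws : List (List Char)) (s k : Int) :
    (PySem.Dict.mk ((PySem.List.enumerate ws s).map (fun p => (p.1, pvFmt p.1 p.2)))).get? k
    = if s ≤ k then
        ((PySem.List.enumerate ws s).map (fun p => pvFmt p.1 p.2))[(k - s).toNat]?
      else none := by
  induction ws generalizing s with
  | nil =>
    rw [PySem.List.enumerate_nil]
    simp only [List.map_nil]
    rw [show (PySem.Dict.mk ([] : List (Int × List Char))) = PySem.Dict.empty from rfl]
    simp [PySem.Dict.get?_empty]
  | cons w t ih =>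
    rw [PySem.List.enumerate_cons]
    simp only [List.map_cons, PySem.Dict.get?_mk_cons]
    by_cases hk : s = k
    · rw [if_pos (by simp [hk]), if_pos (le_of_eq hk),
          show (k - s).toNat = 0 from by omega]
      simp
    · rw [if_neg (by simp [hk]), ih (s + 1)]
      by_cases hle : s ≤ k
      · rw [if_pos (by omega), if_pos hle,
            show (k - s).toNat = (k - (s + 1)).toNat + 1 from by omega]
        simp
      · rw [if_neg (by omega), if_neg hle]

-- Dict.ofList over the distinct enumerate keys is the literal association list
lemma pvOfList (ws : List (List Char)) :
    PySem.Dict.ofList ((PySem.List.enumerate ws 0).map (fun p => (p.1, pvFmt p.1 p.2)))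
    = PySem.Dict.mk ((PySem.List.enumerate ws 0).map (fun p => (p.1, pvFmt p.1 p.2))) := by
  set pairs := (PySem.List.enumerate ws 0).map (fun p => (p.1, pvFmt p.1 p.2)) with hp
  have h1 : (PySem.List.enumerate ws 0).Pairwise (fun p q => p.1 ≠ q.1) :=
    (PySem.List.pairwise_lt_enumerate ws 0).imp (fun h => Int.ne_of_lt h)
  have hnd : (pairs.map (fun q => q.1)).Nodup := by
    rw [hp, List.map_map]
    exact List.pairwise_map.mpr h1
  have hfresh : ∀ p ∈ pairs, (PySem.Dict.empty : PySem.Dict Int (List Char)).contains p.1 = false := by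
    intro p _
    simp [PySem.Dict.contains_empty]
  have h := PySem.Dict.items_foldl_insert_fresh pairs (fun q : Int × List Char => q.1)
    (fun q => q.2) PySem.Dict.empty hfresh hnd
  have h' : (pairs.foldl (fun d p => d.insert p.1 p.2) PySem.Dict.empty).items
      = PySem.Dict.empty.items ++ pairs.map (fun p => (p.1, p.2)) := h
  apply PySem.Dict.ext
  rw [show PySem.Dict.ofList pairs = pairs.foldl (fun d p => d.insert p.1 p.2) PySem.Dict.empty from rfl,
      h']
  simp [PySem.Dict.empty]

-- filterMap of a guarded some is map over filter
lemma pvFilterMapGuard {α β : Type} (l : List α) (p : α → Prop) [DecidablePred p] (h : α → β) :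
    l.filterMap (fun c => if p c then some (h c) else none)
    = (l.filter (fun c => decide (p c))).map h := by
  induction l with
  | nil => rfl
  | cons x t ih =>
    rw [List.filterMap_cons, List.filter_cons]
    by_cases hx : p x
    · simp [hx, ih]
    · simp [hx, ih]

lemma pvBeqDecide (a b : Int) : (a == b) = decide (a = b) := by
  by_cases h : a = b <;> simp [h]

-- the grid indices, row r: reading column c = 0,1,2,… of row r left to right visits exactly
-- the word indices j < rows*cols with j % rows = r, in increasing order
lemma pvIdx (rows cols r n : Int) (h0 : 0 < rows) (hr0 : 0 ≤ r) (hrR : r < rows) :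
    (PySem.List.pyRange 0 n 1).filter
        (fun j => decide (j < rows * cols) && decide (PySem.Int.mod j rows = r))
    = ((PySem.List.pyRange 0 cols 1).filter (fun c => decide (c * rows + r < n))).map
        (fun c => c * rows + r) := by
  have hL : (PySem.List.pyRange 0 n 1).filter
      (fun j => decide (j < rows * cols) && decide (PySem.Int.mod j rows = r)) |>.Pairwise (· < ·) :=
    (PySem.List.pairwise_lt_pyRange_one 0 n).filter _
  have hR : (((PySem.List.pyRange 0 cols 1).filter (fun c => decide (c * rows + r < n))).map
      (fun c => c * rows + r)).Pairwise (· < ·) := by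
    refine List.Pairwise.map _ (fun a b hab => ?_)
      ((PySem.List.pairwise_lt_pyRange_one 0 cols).filter _)
    have := mul_lt_mul_of_pos_right hab h0
    omega
  have hperm : ((PySem.List.pyRange 0 n 1).filter
      (fun j => decide (j < rows * cols) && decide (PySem.Int.mod j rows = r))).Perm
      (((PySem.List.pyRange 0 cols 1).filter (fun c => decide (c * rows + r < n))).map
        (fun c => c * rows + r)) := by
    refine (List.perm_ext_iff_of_nodup (hL.imp ne_of_lt) (hR.imp ne_of_lt)).mpr (fun x => ?_)
    simp only [List.mem_filter, List.mem_map, PySem.List.mem_pyRange_one, decide_eq_true_eq,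
      Bool.and_eq_true]
    constructor
    · rintro ⟨⟨hx0, hxn⟩, hlim, hmod⟩
      refine ⟨PySem.Int.floordiv x rows, ⟨⟨?_, ?_⟩, ?_⟩, ?_⟩
      · rw [PySem.Int.floordiv_eq_ediv_of_pos h0]
        exact Int.ediv_nonneg hx0 h0.le
      · -- floordiv x rows < cols from x < rows*cols
        by_contra hc
        rw [not_lt] at hc
        have h1 : PySem.Int.floordiv x rows * rows + PySem.Int.mod x rows = x :=
          PySem.Int.floordiv_mul_add_mod x rows
        have h2 : cols * rows ≤ PySem.Int.floordiv x rows * rows :=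
          mul_le_mul_of_nonneg_right hc h0.le
        have h3 : rows * cols = cols * rows := mul_comm _ _
        omega
      · have h1 : PySem.Int.floordiv x rows * rows + PySem.Int.mod x rows = x :=
          PySem.Int.floordiv_mul_add_mod x rows
        omega
      · have h1 : PySem.Int.floordiv x rows * rows + PySem.Int.mod x rows = x :=
          PySem.Int.floordiv_mul_add_mod x rows
        omega
    · rintro ⟨c, ⟨⟨hc0, hcC⟩, hn⟩, rfl⟩
      have hcr : 0 ≤ c * rows := mul_nonneg hc0 h0.le
      refine ⟨⟨by omega, hn⟩, ?_, ?_⟩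
      · have h2 : (c + 1) * rows ≤ cols * rows :=
          mul_le_mul_of_nonneg_right (by omega) h0.le
        have h3 : rows * cols = cols * rows := mul_comm _ _
        have h4 : (c + 1) * rows = c * rows + rows := by ring
        omega
      · rw [PySem.Int.mod_eq_emod_of_pos h0,
            show c * rows + r = r + rows * c from by ring,
            Int.add_mul_emod_self_left]
        exact Int.emod_eq_of_lt hr0 hrR
  calc (PySem.List.pyRange 0 n 1).filter
        (fun j => decide (j < rows * cols) && decide (PySem.Int.mod j rows = r))
      = PySem.List.sorted ((PySem.List.pyRange 0 n 1).filter
          (fun j => decide (j < rows * cols) && decide (PySem.Int.mod j rows = r))) (fun x => x) :=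
        (PySem.List.sorted_eq_of_perm_of_pairwise_lt _ _ _ (List.Perm.refl _) hL).symm
    _ = _ := PySem.List.sorted_eq_of_perm_of_pairwise_lt _ _ _ hperm.symm hR

theorem organize_mnemonic_spec : Claim_equal_organize_mnemonic := by
  intro mnemonic rows cols label _
  unfold Spec_organize_mnemonic organize_mnemonic organize_mnemonic_alt enumerate_mnemonic
  set ws := PySem.Chars.splitOn mnemonic.toList [' '] with hws
  refine List.map_congr_left (fun r hr => ?_)
  obtain ⟨hr0, hrR⟩ := PySem.List.mem_pyRange_one.mp hr
  have hrows : (0 : Int) < rows := by omega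
  rw [pvOfList, pvFoldA]
  -- B's buckets: the distribution fold, closed into a filter of the enumerate list
  have hB : ((PySem.List.enumerate ws 0).foldl
        (fun d p =>
          if p.1 < rows * cols then d.modify (PySem.Int.mod p.1 rows) [] (fun x => x ++ [pvFmt p.1 p.2])
          else d)
        PySem.Dict.empty).getD r []
      = (((PySem.List.enumerate ws 0).filter (fun p => decide (p.1 < rows * cols))).filter
          (fun p => PySem.Int.mod p.1 rows == r)).map (fun p => pvFmt p.1 p.2) := by
    rw [PySem.List.foldl_ite_eq_foldl_filter (fun p : Int × List Char => p.1 < rows * cols)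
        (fun (d : PySem.Dict Int (List (List Char))) p =>
          d.modify (PySem.Int.mod p.1 rows) [] (fun x => x ++ [pvFmt p.1 p.2]))]
    rw [show (List.foldl (fun d p => d.modify (PySem.Int.mod p.1 rows) [] (fun x => x ++ [pvFmt p.1 p.2]))
          PySem.Dict.empty ((PySem.List.enumerate ws 0).filter (fun p => decide (p.1 < rows * cols))))
        = List.foldl (fun d p => d.modify p.1 [] (fun x => x ++ [p.2])) PySem.Dict.empty
            (((PySem.List.enumerate ws 0).filter (fun p => decide (p.1 < rows * cols))).map
              (fun p => (PySem.Int.mod p.1 rows, pvFmt p.1 p.2))) from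
        (List.foldl_map
          (f := fun p : Int × List Char => (PySem.Int.mod p.1 rows, pvFmt p.1 p.2))
          (g := fun (d : PySem.Dict Int (List (List Char))) (q : Int × List Char) =>
            d.modify q.1 [] (fun x => x ++ [q.2]))).symm]
    rw [PySem.Dict.getD_foldl_modify_append, List.filter_map, List.map_map]
    simp [PySem.Dict.getD_empty, Function.comp_def]
  rw [hB]
  -- A's cells: strip the never-firing isEmpty test, leaving indexed lookups into the formatted list
  have hA : ∀ c : Int, 0 ≤ c →
      ((PySem.Dict.mk ((PySem.List.enumerate ws 0).map (fun p => (p.1, pvFmt p.1 p.2)))).get?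
          (c * rows + r)).bind (fun w => if w.isEmpty then none else some w)
      = if c * rows + r < (ws.length : Int)
          then some (pvFmt (c * rows + r) (PySem.List.pyGetD ws (c * rows + r) []))
          else none := by
    intro c hc0
    have hk0 : (0 : Int) ≤ c * rows + r := by
      have := mul_nonneg hc0 hrows.le; omega
    rw [pvDictGet _ 0, if_pos hk0, show c * rows + r - 0 = c * rows + r from by ring]
    rw [show (PySem.List.enumerate ws 0).map (fun p => pvFmt p.1 p.2)
        = (PySem.List.pyRange 0 (PySem.List.len ws) 1).map
            (fun j => pvFmt j (PySem.List.pyGetD ws j [])) from by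
      rw [PySem.List.enumerate_eq_map_pyRange ws [], List.map_map]; rfl]
    rw [List.getElem?_map, PySem.List.getElem?_pyRange_one]
    by_cases hlt : c * rows + r < (ws.length : Int)
    · rw [if_pos hlt, if_pos (by simp [PySem.List.len_eq]; omega)]
      simp only [Option.map_some, Option.bind]
      rw [if_neg (by simpa using pvFmt_ne_nil _ _), show ((0 : Int) + ((c * rows + r).toNat : Int)) = c * rows + r from by omega]
    · rw [if_neg hlt, if_neg (by simp [PySem.List.len_eq]; omega)]
      rfl
  -- both sides now reduce to the same index list (pvIdx)
  have hcells :
      (PySem.List.pyRange 0 cols 1).filterMap (fun c =>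
        ((PySem.Dict.mk ((PySem.List.enumerate ws 0).map (fun p => (p.1, pvFmt p.1 p.2)))).get?
            (c * rows + r)).bind (fun w => if w.isEmpty then none else some w))
      = (((PySem.List.enumerate ws 0).filter (fun p => decide (p.1 < rows * cols))).filter
          (fun p => PySem.Int.mod p.1 rows == r)).map (fun p => pvFmt p.1 p.2) := by
    have h1 : (PySem.List.pyRange 0 cols 1).filterMap (fun c =>
          ((PySem.Dict.mk ((PySem.List.enumerate ws 0).map (fun p => (p.1, pvFmt p.1 p.2)))).get?
              (c * rows + r)).bind (fun w => if w.isEmpty then none else some w))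
        = (PySem.List.pyRange 0 cols 1).filterMap (fun c =>
            if c * rows + r < (ws.length : Int)
              then some (pvFmt (c * rows + r) (PySem.List.pyGetD ws (c * rows + r) []))
              else none) := by
      refine List.filterMap_congr (fun c hc => ?_)
      exact hA c (PySem.List.mem_pyRange_one.mp hc).1
    rw [h1, pvFilterMapGuard (PySem.List.pyRange 0 cols 1)
          (fun c => c * rows + r < (ws.length : Int))
          (fun c => pvFmt (c * rows + r) (PySem.List.pyGetD ws (c * rows + r) []))]
    -- now close the RHS into the same mapped index list
    have hfix : ((PySem.List.pyRange 0 (PySem.List.len ws) 1).filter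
          ((fun p : Int × List Char => PySem.Int.mod p.1 rows == r && decide (p.1 < rows * cols)) ∘
            (fun j => (j, PySem.List.pyGetD ws j []))))
        = (PySem.List.pyRange 0 ((ws.length : Int)) 1).filter
            (fun j => decide (j < rows * cols) && decide (PySem.Int.mod j rows = r)) := by
      rw [PySem.List.len_eq]
      refine List.filter_congr (fun j _ => ?_)
      simp only [Function.comp, pvBeqDecide, Bool.and_comm]
    have hRHS : (((PySem.List.enumerate ws 0).filter (fun p => decide (p.1 < rows * cols))).filter
          (fun p => PySem.Int.mod p.1 rows == r)).map
            (fun p : Int × List Char => pvFmt p.1 p.2)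
        = ((PySem.List.pyRange 0 cols 1).filter (fun c => decide (c * rows + r < (ws.length : Int)))).map
            (fun c => pvFmt (c * rows + r) (PySem.List.pyGetD ws (c * rows + r) [])) := by
      rw [List.filter_filter,
          show (PySem.List.enumerate ws 0) = (PySem.List.pyRange 0 (PySem.List.len ws) 1).map
              (fun j => (j, PySem.List.pyGetD ws j [])) from PySem.List.enumerate_eq_map_pyRange ws [],
          List.filter_map, List.map_map, hfix, pvIdx rows cols r _ hrows hr0 hrR, List.map_map]
      rfl
    rw [hRHS]
  rw [hcells]
  simp only [List.nil_append]
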